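-- pv_equiv track=rewrite | github.com/ransomeye/ransomeye.v1 | ransomeye_posture_engine/engine/normalizer.py | _is_external_ip
-- ===== SOURCE A (Python) =====
-- def _is_external_ip(ip: str) -> bool:
--     """Check if IP is external (not private)."""
--     if not ip:
--         return False
--
--     # Simple check for private IP ranges
--     private_ranges = [
--         '10.', '172.16.', '172.17.', '172.18.', '172.19.',
--         '172.20.', '172.21.', '172.22.', '172.23.', '172.24.',
--         '172.25.', '172.26.', '172.27.', '172.28.', '172.29.',
--         '172.30.', '172.31.', '192.168.', '127.', '169.254.'
--     ]
--
--     return not any(ip.startswith(pr) for pr in private_ranges)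
-- ===== SOURCE B (Python) =====
-- def _is_external_ip(ip: str) -> bool:
--     """Check if IP is external (not private)."""
--     if not ip:
--         return False
--     parts = ip.split('.', 2)
--     if len(parts) < 2:
--         return True
--     first = parts[0]
--     if first in ('10', '127'):
--         return False
--     if len(parts) < 3:
--         return True
--     second = parts[1]
--     if first == '192':
--         return second != '168'
--     if first == '169':
--         return second != '254'
--     if first == '172':
--         return second not in [str(n) for n in range(16, 32)]
--     return True
-- ===== Notes on version B (the rewrite author's own statement) =====
-- stated objective: alternative
-- what changed: A scans a 20-element list of private prefixes with startswith; B splits the string once on the dot separator (maxsplit 2) and decides from the first two octet fields, with the 172.16-172.31 band generated by range(16,32).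
import Mathlib
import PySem

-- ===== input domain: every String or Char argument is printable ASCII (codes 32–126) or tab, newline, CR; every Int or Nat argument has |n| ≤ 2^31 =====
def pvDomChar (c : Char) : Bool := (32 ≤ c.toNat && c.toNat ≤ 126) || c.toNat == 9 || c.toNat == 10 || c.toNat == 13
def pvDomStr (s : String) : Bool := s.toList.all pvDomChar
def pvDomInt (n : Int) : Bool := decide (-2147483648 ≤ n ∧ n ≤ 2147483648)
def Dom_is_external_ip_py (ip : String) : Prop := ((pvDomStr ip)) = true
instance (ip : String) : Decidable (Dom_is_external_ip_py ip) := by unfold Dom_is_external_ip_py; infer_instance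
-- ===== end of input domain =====

-- B replaces A's scan over 20 literal prefixes by one split('.', 2) and a check of the first two octet fields (alternative decomposition, not claimed faster).

-- ===== PORT A =====
-- literal transliteration of _is_external_ip: empty guard, list of prefix literals, not any(startswith)
def is_external_ip_py (ip : String) : Bool :=
  if ip = "" then false
  else
    let private_ranges : List String :=
      ["10.", "172.16.", "172.17.", "172.18.", "172.19.",
       "172.20.", "172.21.", "172.22.", "172.23.", "172.24.",
       "172.25.", "172.26.", "172.27.", "172.28.", "172.29.",
       "172.30.", "172.31.", "192.168.", "127.", "169.254."]
    !(private_ranges.any (fun pr => PySem.Str.startswith ip pr))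

-- ===== PORT B =====
-- [str(n) for n in range(16, 32)]
def pvPrivBand : List String := (PySem.List.pyRange 16 32 1).map PySem.Int.toStr

-- transliteration of Source B: ip.split('.', 2); the two length guards become the match shapes
def is_external_ip_py_alt (ip : String) : Bool :=
  if ip = "" then false
  else
    match (PySem.Str.splitMax? ip "." 2).getD [] with
    | first :: second :: _ :: _ =>          -- len(parts) ≥ 3
        if first == "10" || first == "127" then false
        else if first == "192" then !(second == "168")
        else if first == "169" then !(second == "254")
        else if first == "172" then !(pvPrivBand.contains second)
        else true
    | [first, _] =>                          -- len(parts) = 2: only the first-octet checks apply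
        if first == "10" || first == "127" then false else true
    | _ => true                              -- len(parts) < 2

-- ===== PRECONDITION & SPEC =====
def Spec_is_external_ip_py (ip : String) (out : Bool) : Prop := out = is_external_ip_py_alt ip
instance (ip : String) (out : Bool) : Decidable (Spec_is_external_ip_py ip out) := by unfold Spec_is_external_ip_py; infer_instance

-- ===== CLAIM (what is proved, stated in full; the proofs are below) =====
def Claim_equal_is_external_ip_py : Prop := ∀ (ip : String), Dom_is_external_ip_py ip → Spec_is_external_ip_py ip (is_external_ip_py ip)

-- ===== LEMMAS AND PROOFS =====

-- "is not a dot", named so that every lemma states fields in the same syntactic form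
def pvNd : Char → Bool := fun x => decide (x ≠ '.')

-- reference splitter: split on '.', at most m splits
def pvSplit : Nat → List Char → List (List Char)
  | 0, l => [l]
  | m+1, l =>
      if '.' ∈ l then l.takeWhile pvNd :: pvSplit m ((l.dropWhile pvNd).tail)
      else [l]

def pvConsHead (p : List Char) : List (List Char) → List (List Char)
  | [] => [p]
  | x :: xs => (p ++ x) :: xs

theorem pvSplit_ne_nil (m : Nat) (l : List Char) : pvSplit m l ≠ [] := by
  cases m <;> simp only [pvSplit] <;> [skip; split] <;> simp

theorem pvGo_eq (l : List Char) : ∀ (fuel m : Nat) (cur : List Char) (acc : List (List Char)),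
    l.length < fuel →
    PySem.Chars.splitOnMax.go ['.'] fuel m l cur acc = acc.reverse ++ pvConsHead cur.reverse (pvSplit m l) := by
  induction l with
  | nil =>
      intro fuel m cur acc hf
      cases fuel with
      | zero => omega
      | succ f =>
          cases m <;> simp [PySem.Chars.splitOnMax.go, pvSplit, pvConsHead]
  | cons c rest ih =>
      intro fuel m cur acc hf
      cases fuel with
      | zero => omega
      | succ f =>
          cases m with
          | zero =>
              simp [PySem.Chars.splitOnMax.go, pvSplit, pvConsHead]
          | succ m' =>
              by_cases hc : c = '.'
              · subst hc
                have hstep : PySem.Chars.splitOnMax.go ['.'] (f+1) (m'+1) ('.' :: rest) cur acc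
                    = PySem.Chars.splitOnMax.go ['.'] f m' rest [] (cur.reverse :: acc) := by
                  simp [PySem.Chars.splitOnMax.go, List.isPrefixOf]
                rw [hstep, ih f m' [] (cur.reverse :: acc) (by simpa using hf)]
                obtain ⟨x, xs, hx⟩ := List.exists_cons_of_ne_nil (pvSplit_ne_nil m' rest)
                simp [pvSplit, pvConsHead, pvNd, hx]
              · have hstep : PySem.Chars.splitOnMax.go ['.'] (f+1) (m'+1) (c :: rest) cur acc
                    = PySem.Chars.splitOnMax.go ['.'] f (m'+1) rest (c :: cur) acc := by
                  simp [PySem.Chars.splitOnMax.go, List.isPrefixOf, Ne.symm hc]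
                rw [hstep, ih f (m'+1) (c :: cur) acc (by simpa using hf)]
                by_cases hd : ('.' : Char) ∈ rest
                · simp [pvSplit, hd, pvNd, hc, Ne.symm hc, pvConsHead]
                · simp [pvSplit, hd,  Ne.symm hc, pvConsHead]

theorem pvSplitMax_eq (cs : List Char) : PySem.Chars.splitOnMax cs ['.'] 2 = pvSplit 2 cs := by
  rw [PySem.Chars.splitOnMax]
  norm_num
  rw [show (2 : Int).toNat = 2 from rfl, pvGo_eq cs (cs.length + 1) 2 [] [] (by omega)]
  obtain ⟨x, xs, hx⟩ := List.exists_cons_of_ne_nil (pvSplit_ne_nil 2 cs)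
  simp [pvConsHead, hx]

-- startswith through the first '.': (p ++ '.' :: r) is a prefix iff p is exactly the first field
theorem pvPrefix_seg (p : List Char) : ∀ (r cs : List Char), ('.' : Char) ∉ p →
    ((p ++ '.' :: r <+: cs) ↔
      (cs.takeWhile pvNd = p ∧ ('.' : Char) ∈ cs ∧ r <+: (cs.dropWhile pvNd).tail)) := by
  induction p with
  | nil =>
      intro r cs _
      cases cs with
      | nil => simp
      | cons c t =>
          by_cases hc : c = '.'
          · subst hc; simp [List.cons_prefix_cons, pvNd]
          · simp [List.cons_prefix_cons, pvNd, hc, Ne.symm hc]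
  | cons a p' ih =>
      intro r cs hp
      have ha : a ≠ '.' := fun h => hp (h ▸ List.mem_cons_self)
      have hp' : ('.' : Char) ∉ p' := fun h => hp (List.mem_cons_of_mem _ h)
      cases cs with
      | nil => simp
      | cons c t =>
          by_cases hc : c = '.'
          · subst hc
            simp [List.cons_prefix_cons, pvNd, ha]
          · have e1 : List.takeWhile pvNd (c :: t) = c :: List.takeWhile pvNd t :=
              List.takeWhile_cons_of_pos (by simp [pvNd, hc])
            have e2 : List.dropWhile pvNd (c :: t) = List.dropWhile pvNd t :=
              List.dropWhile_cons_of_pos (by simp [pvNd, hc])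
            have e3 : (('.' : Char) ∈ c :: t) ↔ (('.' : Char) ∈ t) := by
              simp [Ne.symm hc]
            rw [List.cons_append, List.cons_prefix_cons, e1, e2, e3, ih r t hp']
            simp [List.cons.injEq, and_assoc, eq_comm]

theorem pvSeg_false (p r cs : List Char) (hp : ('.' : Char) ∉ p) :
    (PySem.Chars.startswith cs (p ++ '.' :: r) = false) ↔
      ¬(cs.takeWhile pvNd = p ∧ ('.' : Char) ∈ cs ∧ r <+: (cs.dropWhile pvNd).tail) := by
  rw [← Bool.not_eq_true, PySem.Chars.startswith_iff, pvPrefix_seg p r cs hp]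

theorem pvOfList_eq_iff (l : List Char) (s : String) : String.ofList l = s ↔ l = s.toList := by
  constructor
  · rintro rfl; simp
  · rintro rfl; simp

theorem pvBand_eq : pvPrivBand = ["16","17","18","19","20","21","22","23","24","25","26","27","28","29","30","31"] := by
  decide

theorem pvMain (ip : String) : is_external_ip_py ip = is_external_ip_py_alt ip := by
  by_cases h0 : ip = ""
  · simp [is_external_ip_py, is_external_ip_py_alt, h0]
  · have hsplit : (PySem.Str.splitMax? ip "." 2).getD []
        = (pvSplit 2 ip.toList).map String.ofList := by
      simp [PySem.Str.splitMax?, PySem.Chars.splitMax?,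
        show ("." : String).toList = ['.'] from rfl, pvSplitMax_eq]
    rw [Bool.eq_iff_iff]
    simp only [is_external_ip_py, is_external_ip_py_alt, if_neg h0, hsplit]
    by_cases hd1 : ('.' : Char) ∈ ip.toList
    · by_cases hd2 : ('.' : Char) ∈ ((ip.toList.dropWhile pvNd).tail)
      · have hp2 : pvSplit 2 ip.toList
            = [ip.toList.takeWhile pvNd,
               ((ip.toList.dropWhile pvNd).tail).takeWhile pvNd,
               ((((ip.toList.dropWhile pvNd).tail).dropWhile pvNd).tail)] := by
          simp [pvSplit, hd1, hd2]
        rw [hp2]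
        simp only [List.map_cons, List.map_nil, List.any_cons, List.any_nil,
          Bool.or_eq_true, Bool.not_eq_true', Bool.or_eq_false_iff, PySem.Str.startswith_eq,
          show ("10." : String).toList = ['1', '0'] ++ '.' :: [] from rfl,
          show ("172.16." : String).toList = ['1', '7', '2'] ++ '.' :: (['1', '6'] ++ '.' :: []) from rfl,
          show ("172.17." : String).toList = ['1', '7', '2'] ++ '.' :: (['1', '7'] ++ '.' :: []) from rfl,
          show ("172.18." : String).toList = ['1', '7', '2'] ++ '.' :: (['1', '8'] ++ '.' :: []) from rfl,
          show ("172.19." : String).toList = ['1', '7', '2'] ++ '.' :: (['1', '9'] ++ '.' :: []) from rfl,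
          show ("172.20." : String).toList = ['1', '7', '2'] ++ '.' :: (['2', '0'] ++ '.' :: []) from rfl,
          show ("172.21." : String).toList = ['1', '7', '2'] ++ '.' :: (['2', '1'] ++ '.' :: []) from rfl,
          show ("172.22." : String).toList = ['1', '7', '2'] ++ '.' :: (['2', '2'] ++ '.' :: []) from rfl,
          show ("172.23." : String).toList = ['1', '7', '2'] ++ '.' :: (['2', '3'] ++ '.' :: []) from rfl,
          show ("172.24." : String).toList = ['1', '7', '2'] ++ '.' :: (['2', '4'] ++ '.' :: []) from rfl,
          show ("172.25." : String).toList = ['1', '7', '2'] ++ '.' :: (['2', '5'] ++ '.' :: []) from rfl,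
          show ("172.26." : String).toList = ['1', '7', '2'] ++ '.' :: (['2', '6'] ++ '.' :: []) from rfl,
          show ("172.27." : String).toList = ['1', '7', '2'] ++ '.' :: (['2', '7'] ++ '.' :: []) from rfl,
          show ("172.28." : String).toList = ['1', '7', '2'] ++ '.' :: (['2', '8'] ++ '.' :: []) from rfl,
          show ("172.29." : String).toList = ['1', '7', '2'] ++ '.' :: (['2', '9'] ++ '.' :: []) from rfl,
          show ("172.30." : String).toList = ['1', '7', '2'] ++ '.' :: (['3', '0'] ++ '.' :: []) from rfl,
          show ("172.31." : String).toList = ['1', '7', '2'] ++ '.' :: (['3', '1'] ++ '.' :: []) from rfl,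
          show ("192.168." : String).toList = ['1', '9', '2'] ++ '.' :: (['1', '6', '8'] ++ '.' :: []) from rfl,
          show ("127." : String).toList = ['1', '2', '7'] ++ '.' :: [] from rfl,
          show ("169.254." : String).toList = ['1', '6', '9'] ++ '.' :: (['2', '5', '4'] ++ '.' :: []) from rfl]
        rw [pvSeg_false ['1', '0'] [] ip.toList (by decide), pvSeg_false ['1', '7', '2'] (['1', '6'] ++ '.' :: []) ip.toList (by decide), pvSeg_false ['1', '7', '2'] (['1', '7'] ++ '.' :: []) ip.toList (by decide), pvSeg_false ['1', '7', '2'] (['1', '8'] ++ '.' :: []) ip.toList (by decide), pvSeg_false ['1', '7', '2'] (['1', '9'] ++ '.' :: []) ip.toList (by decide), pvSeg_false ['1', '7', '2'] (['2', '0'] ++ '.' :: []) ip.toList (by decide), pvSeg_false ['1', '7', '2'] (['2', '1'] ++ '.' :: []) ip.toList (by decide), pvSeg_false ['1', '7', '2'] (['2', '2'] ++ '.' :: []) ip.toList (by decide), pvSeg_false ['1', '7', '2'] (['2', '3'] ++ '.' :: []) ip.toList (by decide), pvSeg_false ['1', '7', '2'] (['2', '4'] ++ '.' :: []) ip.toList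 (by decide), pvSeg_false ['1', '7', '2'] (['2', '5'] ++ '.' :: []) ip.toList (by decide), pvSeg_false ['1', '7', '2'] (['2', '6'] ++ '.' :: []) ip.toList (by decide), pvSeg_false ['1', '7', '2'] (['2', '7'] ++ '.' :: []) ip.toList (by decide), pvSeg_false ['1', '7', '2'] (['2', '8'] ++ '.' :: []) ip.toList (by decide), pvSeg_false ['1', '7', '2'] (['2', '9'] ++ '.' :: []) ip.toList (by decide), pvSeg_false ['1', '7', '2'] (['3', '0'] ++ '.' :: []) ip.toList (by decide), pvSeg_false ['1', '7', '2'] (['3', '1'] ++ '.' :: []) ip.toList (by decide), pvSeg_false ['1', '9', '2'] (['1', '6', '8'] ++ '.' :: []) ip.toList (by decide), pvSeg_false ['1', '2', '7'] [] ip.toList (by decide), pvSeg_false ['1', '6', '9'] (['2', '5', '4'] ++ '.' :: []) ip.toList (by decide)]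
        rw [pvPrefix_seg ['1', '6'] [] ((ip.toList.dropWhile pvNd).tail) (by decide), pvPrefix_seg ['1', '7'] [] ((ip.toList.dropWhile pvNd).tail) (by decide), pvPrefix_seg ['1', '8'] [] ((ip.toList.dropWhile pvNd).tail) (by decide), pvPrefix_seg ['1', '9'] [] ((ip.toList.dropWhile pvNd).tail) (by decide), pvPrefix_seg ['2', '0'] [] ((ip.toList.dropWhile pvNd).tail) (by decide), pvPrefix_seg ['2', '1'] [] ((ip.toList.dropWhile pvNd).tail) (by decide), pvPrefix_seg ['2', '2'] [] ((ip.toList.dropWhile pvNd).tail) (by decide), pvPrefix_seg ['2', '3'] [] ((ip.toList.dropWhile pvNd).tail) (by decide), pvPrefix_seg ['2', '4'] [] ((ip.toList.dropWhile pvNd).tail) (by decide), pvPrefix_seg ['2', '5'] [] ((ip.toList.dropWhile pvNd).tail) (by decide), pvPrefix_seg ['2', '6'] [] ((ip.toList.dropWhile pvNd).tail) (by decide), pvPrefix_seg ['2', '7'] [] ((ip.toList.dropWhile pvNd).tail) (by decide), pvPrefix_seg ['2', '8'] [] ((ip.toList.dropWhile pvNd).tail) (by decide), pvPrefix_seg ['2',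 '9'] [] ((ip.toList.dropWhile pvNd).tail) (by decide), pvPrefix_seg ['3', '0'] [] ((ip.toList.dropWhile pvNd).tail) (by decide), pvPrefix_seg ['3', '1'] [] ((ip.toList.dropWhile pvNd).tail) (by decide), pvPrefix_seg ['1', '6', '8'] [] ((ip.toList.dropWhile pvNd).tail) (by decide), pvPrefix_seg ['2', '5', '4'] [] ((ip.toList.dropWhile pvNd).tail) (by decide)]
        simp only [List.nil_prefix, and_true, hd1, hd2, true_and, beq_iff_eq, pvOfList_eq_iff,
          show ("10" : String).toList = ['1', '0'] from rfl,
          show ("127" : String).toList = ['1', '2', '7'] from rfl,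
          show ("192" : String).toList = ['1', '9', '2'] from rfl,
          show ("169" : String).toList = ['1', '6', '9'] from rfl,
          show ("172" : String).toList = ['1', '7', '2'] from rfl,
          
          
          show ("16" : String).toList = ['1', '6'] from rfl,
          show ("17" : String).toList = ['1', '7'] from rfl,
          show ("18" : String).toList = ['1', '8'] from rfl,
          show ("19" : String).toList = ['1', '9'] from rfl,
          show ("20" : String).toList = ['2', '0'] from rfl,
          show ("21" : String).toList = ['2', '1'] from rfl,
          show ("22" : String).toList = ['2', '2'] from rfl,
          show ("23" : String).toList = ['2', '3'] from rfl,
          show ("24" : String).toList = ['2', '4'] from rfl,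
          show ("25" : String).toList = ['2', '5'] from rfl,
          show ("26" : String).toList = ['2', '6'] from rfl,
          show ("27" : String).toList = ['2', '7'] from rfl,
          show ("28" : String).toList = ['2', '8'] from rfl,
          show ("29" : String).toList = ['2', '9'] from rfl,
          show ("30" : String).toList = ['3', '0'] from rfl,
          show ("31" : String).toList = ['3', '1'] from rfl,
          pvBand_eq, List.contains_eq_mem,  List.mem_cons, List.not_mem_nil, or_false]
        split_ifs with h1 h2 h3 h4
        · rcases h1 with h | h <;> simp [h]
        · simp [h2, pvOfList_eq_iff, show ("168" : String).toList = ['1', '6', '8'] from rfl]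
        · simp [h3, pvOfList_eq_iff, show ("254" : String).toList = ['2', '5', '4'] from rfl]
        · simp [h4]
        · obtain ⟨h1a, h1b⟩ := not_or.mp h1
          simp [h1a, h1b, h2, h3, h4]
      · have hp2 : pvSplit 2 ip.toList = [ip.toList.takeWhile pvNd, (ip.toList.dropWhile pvNd).tail] := by
          simp [pvSplit, hd1, hd2]
        rw [hp2]
        simp only [List.map_cons, List.map_nil, List.any_cons, List.any_nil,
          Bool.or_eq_true, Bool.not_eq_true', Bool.or_eq_false_iff, PySem.Str.startswith_eq,
          show ("10." : String).toList = ['1', '0'] ++ '.' :: [] from rfl,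
          show ("172.16." : String).toList = ['1', '7', '2'] ++ '.' :: (['1', '6'] ++ '.' :: []) from rfl,
          show ("172.17." : String).toList = ['1', '7', '2'] ++ '.' :: (['1', '7'] ++ '.' :: []) from rfl,
          show ("172.18." : String).toList = ['1', '7', '2'] ++ '.' :: (['1', '8'] ++ '.' :: []) from rfl,
          show ("172.19." : String).toList = ['1', '7', '2'] ++ '.' :: (['1', '9'] ++ '.' :: []) from rfl,
          show ("172.20." : String).toList = ['1', '7', '2'] ++ '.' :: (['2', '0'] ++ '.' :: []) from rfl,
          show ("172.21." : String).toList = ['1', '7', '2'] ++ '.' :: (['2', '1'] ++ '.' :: []) from rfl,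
          show ("172.22." : String).toList = ['1', '7', '2'] ++ '.' :: (['2', '2'] ++ '.' :: []) from rfl,
          show ("172.23." : String).toList = ['1', '7', '2'] ++ '.' :: (['2', '3'] ++ '.' :: []) from rfl,
          show ("172.24." : String).toList = ['1', '7', '2'] ++ '.' :: (['2', '4'] ++ '.' :: []) from rfl,
          show ("172.25." : String).toList = ['1', '7', '2'] ++ '.' :: (['2', '5'] ++ '.' :: []) from rfl,
          show ("172.26." : String).toList = ['1', '7', '2'] ++ '.' :: (['2', '6'] ++ '.' :: []) from rfl,
          show ("172.27." : String).toList = ['1', '7', '2'] ++ '.' :: (['2', '7'] ++ '.' :: []) from rfl,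
          show ("172.28." : String).toList = ['1', '7', '2'] ++ '.' :: (['2', '8'] ++ '.' :: []) from rfl,
          show ("172.29." : String).toList = ['1', '7', '2'] ++ '.' :: (['2', '9'] ++ '.' :: []) from rfl,
          show ("172.30." : String).toList = ['1', '7', '2'] ++ '.' :: (['3', '0'] ++ '.' :: []) from rfl,
          show ("172.31." : String).toList = ['1', '7', '2'] ++ '.' :: (['3', '1'] ++ '.' :: []) from rfl,
          show ("192.168." : String).toList = ['1', '9', '2'] ++ '.' :: (['1', '6', '8'] ++ '.' :: []) from rfl,
          show ("127." : String).toList = ['1', '2', '7'] ++ '.' :: [] from rfl,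
          show ("169.254." : String).toList = ['1', '6', '9'] ++ '.' :: (['2', '5', '4'] ++ '.' :: []) from rfl]
        rw [pvSeg_false ['1', '0'] [] ip.toList (by decide), pvSeg_false ['1', '7', '2'] (['1', '6'] ++ '.' :: []) ip.toList (by decide), pvSeg_false ['1', '7', '2'] (['1', '7'] ++ '.' :: []) ip.toList (by decide), pvSeg_false ['1', '7', '2'] (['1', '8'] ++ '.' :: []) ip.toList (by decide), pvSeg_false ['1', '7', '2'] (['1', '9'] ++ '.' :: []) ip.toList (by decide), pvSeg_false ['1', '7', '2'] (['2', '0'] ++ '.' :: []) ip.toList (by decide), pvSeg_false ['1', '7', '2'] (['2', '1'] ++ '.' :: []) ip.toList (by decide), pvSeg_false ['1', '7', '2'] (['2', '2'] ++ '.' :: []) ip.toList (by decide), pvSeg_false ['1', '7', '2'] (['2', '3'] ++ '.' :: []) ip.toList (by decide), pvSeg_false ['1', '7', '2'] (['2', '4'] ++ '.' :: []) ip.toList (by decide), pvSeg_false ['1', '7', '2'] (['2', '5'] ++ '.' :: []) ip.toList (by decide), pvSeg_false ['1', '7', '2'] (['2', '6'] ++ '.' :: []) ip.toList (by decide), pvSeg_false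 ['1', '7', '2'] (['2', '7'] ++ '.' :: []) ip.toList (by decide), pvSeg_false ['1', '7', '2'] (['2', '8'] ++ '.' :: []) ip.toList (by decide), pvSeg_false ['1', '7', '2'] (['2', '9'] ++ '.' :: []) ip.toList (by decide), pvSeg_false ['1', '7', '2'] (['3', '0'] ++ '.' :: []) ip.toList (by decide), pvSeg_false ['1', '7', '2'] (['3', '1'] ++ '.' :: []) ip.toList (by decide), pvSeg_false ['1', '9', '2'] (['1', '6', '8'] ++ '.' :: []) ip.toList (by decide), pvSeg_false ['1', '2', '7'] [] ip.toList (by decide), pvSeg_false ['1', '6', '9'] (['2', '5', '4'] ++ '.' :: []) ip.toList (by decide)]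
        rw [pvPrefix_seg ['1', '6'] [] ((ip.toList.dropWhile pvNd).tail) (by decide), pvPrefix_seg ['1', '7'] [] ((ip.toList.dropWhile pvNd).tail) (by decide), pvPrefix_seg ['1', '8'] [] ((ip.toList.dropWhile pvNd).tail) (by decide), pvPrefix_seg ['1', '9'] [] ((ip.toList.dropWhile pvNd).tail) (by decide), pvPrefix_seg ['2', '0'] [] ((ip.toList.dropWhile pvNd).tail) (by decide), pvPrefix_seg ['2', '1'] [] ((ip.toList.dropWhile pvNd).tail) (by decide), pvPrefix_seg ['2', '2'] [] ((ip.toList.dropWhile pvNd).tail) (by decide), pvPrefix_seg ['2', '3'] [] ((ip.toList.dropWhile pvNd).tail) (by decide), pvPrefix_seg ['2', '4'] [] ((ip.toList.dropWhile pvNd).tail) (by decide), pvPrefix_seg ['2', '5'] [] ((ip.toList.dropWhile pvNd).tail) (by decide), pvPrefix_seg ['2', '6'] [] ((ip.toList.dropWhile pvNd).tail) (by decide), pvPrefix_seg ['2', '7'] [] ((ip.toList.dropWhile pvNd).tail) (by decide), pvPrefix_seg ['2', '8'] [] ((ip.toList.dropWhile pvNd).tail) (by decide), pvPrefix_seg ['2',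 '9'] [] ((ip.toList.dropWhile pvNd).tail) (by decide), pvPrefix_seg ['3', '0'] [] ((ip.toList.dropWhile pvNd).tail) (by decide), pvPrefix_seg ['3', '1'] [] ((ip.toList.dropWhile pvNd).tail) (by decide), pvPrefix_seg ['1', '6', '8'] [] ((ip.toList.dropWhile pvNd).tail) (by decide), pvPrefix_seg ['2', '5', '4'] [] ((ip.toList.dropWhile pvNd).tail) (by decide)]
        simp only [List.nil_prefix, and_true, hd1, hd2,   and_false, 
          beq_iff_eq, pvOfList_eq_iff,
          show ("10" : String).toList = ['1', '0'] from rfl,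
          show ("127" : String).toList = ['1', '2', '7'] from rfl]
        split_ifs with h1
        · rcases h1 with h | h <;> simp [h]
        · obtain ⟨h1a, h1b⟩ := not_or.mp h1
          simp [h1a, h1b]
    · have hp2 : pvSplit 2 ip.toList = [ip.toList] := by simp [pvSplit, hd1]
      rw [hp2]
      have hany : (["10.", "172.16.", "172.17.", "172.18.", "172.19.", "172.20.", "172.21.",
          "172.22.", "172.23.", "172.24.", "172.25.", "172.26.", "172.27.", "172.28.", "172.29.",
          "172.30.", "172.31.", "192.168.", "127.", "169.254."].any
            fun pr => PySem.Str.startswith ip pr) = false := by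
        rw [List.any_eq_false]
        intro pr hpr
        have hdot : ('.' : Char) ∈ pr.toList := by fin_cases hpr <;> decide
        intro h
        rw [PySem.Str.startswith_eq] at h
        exact hd1 (((PySem.Chars.startswith_iff _ _).1 h).subset hdot)
      rw [hany]
      simp

-- ===== VERDICT (by name: the statement is the Claim_ definition above) =====
theorem is_external_ip_py_spec : Claim_equal_is_external_ip_py := by
  intro ip _
  unfold Spec_is_external_ip_py
  exact pvMain ip
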